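-- pv_equiv track=rewrite | github.com/Miguecetin/Project-Euler-Solutions | python solutions/017_number_letter_counts.py | nunmber_letter_counts
-- ===== SOURCE A (Python) =====
-- def nunmber_letter_counts(rangemax: int = 1000) -> int:
--
--     words = { 0 : '', 1 : 'one', 2 : 'two', 3 : 'three', 4 : 'four', 5 : 'five',
--         6 : 'six', 7 : 'seven', 8 : 'eight', 9 : 'nine', 10 : 'ten',
--         11 : 'eleven', 12 : 'twelve', 13 : 'thirteen', 14 : 'fourteen',
--         15 : 'fifteen', 16 : 'sixteen', 17 : 'seventeen', 18 : 'eighteen',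
--         19 : 'nineteen', 20 : 'twenty', 30 : 'thirty', 40 : 'forty',
--         50 : 'fifty', 60 : 'sixty', 70 : 'seventy', 80 : 'eighty', 90 : 'ninety'}
--
--     storage = []
--
--     for i in range(1, rangemax + 1):
--         if i == 1000:
--             storage.append(words[1] + " thousand")
--
--         elif i in range(1, 21): # From 1 to 20
--             storage.append(words[i])
--
--         elif i == 100 or i == 200 or i == 300 or i == 400 or i == 500 or i == 600 or i == 700 or i == 800 or i == 900: # Case for the round hundreds
--
--             storage.append(words[i // 100] + " hundred")
--
--         elif i in range(21, 100): # From 21 to 99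
--
--             storage.append(words[ int(str(i)[0] + '0') ] + " " + words[ int(str(i)[1]) ])
--
--         elif i in range(101, 121) or i in range(201, 221) or i in range(301, 321) or i in range(401, 421) or i in range(501, 521) or i in range(601, 621) or i in range(701, 721) or i in range(801, 821) or i in range(901, 921): # From x00 to x20
--             storage.append(words[ int(str(i)[0]) ] + " hundred and " + words[ int(str(i)[1] + str(i)[2])])
--
--         elif i in range(121, 1000) or i in range(221, 300) or i in range(321, 400) or i in range(421, 500) or i in range(521, 600) or i in range(621, 700) or i in range(721, 800) or i in range(821, 900): # From x21 to 999
--             storage.append(words[ int(str(i)[0]) ] + " hundred and " + words[ int(str(i)[1] + '0') ] + "-" + words[ int(str(i)[2]) ])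
--
--     chara_counter = 0
--     for word in storage:
--         word = word.replace(' ', '').replace('-', '')
--         for _ in word:
--             chara_counter += 1
--
--     return chara_counter
-- ===== SOURCE B (Python) =====
-- def nunmber_letter_counts(rangemax: int = 1000) -> int:
--     # letter counts: ones/teens 0..19, tens 0..9 (index = tens digit)
--     ones = [0, 3, 3, 5, 4, 4, 3, 5, 5, 4, 3, 6, 6, 8, 8, 7, 7, 9, 8, 8]
--     tens = [0, 0, 6, 6, 5, 5, 5, 7, 6, 6]
--
--     def letters(i):
--         if i == 1000:
--             return 11  # "onethousand"
--         h, r = divmod(i, 100)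
--         low = ones[r] if r < 20 else tens[r // 10] + ones[r % 10]
--         if h == 0:
--             return low
--         return ones[h] + 7 + (3 + low if r else 0)  # "hundred" (+ "and")
--
--     n = min(rangemax, 1000)
--     total = 0
--     for i in range(1, n + 1):
--         total += letters(i)
--     return total
-- ===== Notes on version B (the rewrite author's own statement) =====
-- stated objective: faster
-- what changed: B drops A's word-string construction, range-membership chains and character-deletion passes entirely: it sums per-number letter counts from two small arithmetic tables (digit decomposition via divmod), and clamps the loop at min(rangemax, 1000) since numbers above 1000 contribute nothing, so the loop is bounded while A's runs for all rangemax iterations.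
import Mathlib
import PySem

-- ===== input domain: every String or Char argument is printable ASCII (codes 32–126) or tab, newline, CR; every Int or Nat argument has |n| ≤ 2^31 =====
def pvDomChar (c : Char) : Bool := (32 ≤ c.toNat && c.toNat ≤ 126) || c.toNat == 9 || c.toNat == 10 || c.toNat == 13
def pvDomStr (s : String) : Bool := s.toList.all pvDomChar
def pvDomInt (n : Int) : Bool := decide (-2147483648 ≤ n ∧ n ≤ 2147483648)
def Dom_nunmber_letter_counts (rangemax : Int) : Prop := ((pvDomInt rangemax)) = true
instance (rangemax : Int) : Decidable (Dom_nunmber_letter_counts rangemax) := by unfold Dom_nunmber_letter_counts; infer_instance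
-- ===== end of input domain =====

-- B replaces A's per-number word-string construction (and its O(rangemax) loop) by a bounded
-- arithmetic sum over letter-count tables; equal return values are proved for all Int inputs.

-- ===== PORT A =====
-- Python strings are ported on the List Char side (PySem.Chars), per the PySem convention.
def pvWordsA : PySem.Dict Int (List Char) := PySem.Dict.ofList
  [(0, "".toList), (1, "one".toList), (2, "two".toList), (3, "three".toList), (4, "four".toList),
   (5, "five".toList), (6, "six".toList), (7, "seven".toList), (8, "eight".toList), (9, "nine".toList),
   (10, "ten".toList), (11, "eleven".toList), (12, "twelve".toList), (13, "thirteen".toList),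
   (14, "fourteen".toList), (15, "fifteen".toList), (16, "sixteen".toList), (17, "seventeen".toList),
   (18, "eighteen".toList), (19, "nineteen".toList), (20, "twenty".toList), (30, "thirty".toList),
   (40, "forty".toList), (50, "fifty".toList), (60, "sixty".toList), (70, "seventy".toList),
   (80, "eighty".toList), (90, "ninety".toList)]

-- A's loop body for one i: 'some w' = storage.append(w), 'none' = no branch fires.
-- words[k] is ported as (get?).getD [] and str(i)[k] via pyGet?/.getD ' ': exact here, since every
-- lookup A performs under these guards is on a present key / in-range index (no KeyError/IndexError);
-- str(i) is re-evaluated at each subscript, as in A's source.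
def pvEntryA (i : Int) : Option (List Char) :=
  if i = 1000 then some ((pvWordsA.get? 1).getD [] ++ " thousand".toList)
  else if 1 ≤ i ∧ i < 21 then some ((pvWordsA.get? i).getD [])
  else if i = 100 ∨ i = 200 ∨ i = 300 ∨ i = 400 ∨ i = 500 ∨ i = 600 ∨ i = 700 ∨ i = 800 ∨ i = 900 then
    some ((pvWordsA.get? (PySem.Int.floordiv i 100)).getD [] ++ " hundred".toList)
  else if 21 ≤ i ∧ i < 100 then
    some ((pvWordsA.get? ((PySem.Int.ofChars? [(PySem.List.pyGet? (PySem.Int.toChars i) 0).getD ' ', '0']).getD 0)).getD []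
      ++ " ".toList
      ++ (pvWordsA.get? ((PySem.Int.ofChars? [(PySem.List.pyGet? (PySem.Int.toChars i) 1).getD ' ']).getD 0)).getD [])
  else if (101 ≤ i ∧ i < 121) ∨ (201 ≤ i ∧ i < 221) ∨ (301 ≤ i ∧ i < 321) ∨ (401 ≤ i ∧ i < 421) ∨
          (501 ≤ i ∧ i < 521) ∨ (601 ≤ i ∧ i < 621) ∨ (701 ≤ i ∧ i < 721) ∨ (801 ≤ i ∧ i < 821) ∨
          (901 ≤ i ∧ i < 921) then
    some ((pvWordsA.get? ((PySem.Int.ofChars? [(PySem.List.pyGet? (PySem.Int.toChars i) 0).getD ' ']).getD 0)).getD []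
      ++ " hundred and ".toList
      ++ (pvWordsA.get? ((PySem.Int.ofChars? [(PySem.List.pyGet? (PySem.Int.toChars i) 1).getD ' ',
            (PySem.List.pyGet? (PySem.Int.toChars i) 2).getD ' ']).getD 0)).getD [])
  else if (121 ≤ i ∧ i < 1000) ∨ (221 ≤ i ∧ i < 300) ∨ (321 ≤ i ∧ i < 400) ∨ (421 ≤ i ∧ i < 500) ∨
          (521 ≤ i ∧ i < 600) ∨ (621 ≤ i ∧ i < 700) ∨ (721 ≤ i ∧ i < 800) ∨ (821 ≤ i ∧ i < 900) then
    some ((pvWordsA.get? ((PySem.Int.ofChars? [(PySem.List.pyGet? (PySem.Int.toChars i) 0).getD ' ']).getD 0)).getD []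
      ++ " hundred and ".toList
      ++ (pvWordsA.get? ((PySem.Int.ofChars? [(PySem.List.pyGet? (PySem.Int.toChars i) 1).getD ' ', '0']).getD 0)).getD []
      ++ "-".toList
      ++ (pvWordsA.get? ((PySem.Int.ofChars? [(PySem.List.pyGet? (PySem.Int.toChars i) 2).getD ' ']).getD 0)).getD [])
  else none

def nunmber_letter_counts (rangemax : Int) : Int :=
  let storage := (PySem.List.pyRange 1 (rangemax + 1) 1).foldl
    (fun st i => match pvEntryA i with | some w => st ++ [w] | none => st)
    ([] : List (List Char))
  storage.foldl
    (fun c word =>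
      let w := PySem.Chars.replace (PySem.Chars.replace word " ".toList "".toList) "-".toList "".toList
      w.foldl (fun c _ => c + 1) c)
    0

-- ===== PORT B =====
def pvOnes : List Int := [0, 3, 3, 5, 4, 4, 3, 5, 5, 4, 3, 6, 6, 8, 8, 7, 7, 9, 8, 8]
def pvTens : List Int := [0, 0, 6, 6, 5, 5, 5, 7, 6, 6]

-- ones[r] etc. ported as pyGet?/.getD 0: exact, B only indexes in range for 1 ≤ i ≤ 1000.
def pvLetters (i : Int) : Int :=
  if i = 1000 then 11
  else
    let h := PySem.Int.floordiv i 100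
    let r := PySem.Int.mod i 100
    let low := if r < 20 then (PySem.List.pyGet? pvOnes r).getD 0
      else (PySem.List.pyGet? pvTens (PySem.Int.floordiv r 10)).getD 0
           + (PySem.List.pyGet? pvOnes (PySem.Int.mod r 10)).getD 0
    if h = 0 then low
    else (PySem.List.pyGet? pvOnes h).getD 0 + 7 + (if r ≠ 0 then 3 + low else 0)

def nunmber_letter_counts_alt (rangemax : Int) : Int :=
  let n := min rangemax 1000
  (PySem.List.pyRange 1 (n + 1) 1).foldl (fun total i => total + pvLetters i) 0

-- ===== PRECONDITION & SPEC =====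
def Spec_nunmber_letter_counts (rangemax : Int) (out : Int) : Prop := out = nunmber_letter_counts_alt rangemax
instance (rangemax : Int) (out : Int) : Decidable (Spec_nunmber_letter_counts rangemax out) := by unfold Spec_nunmber_letter_counts; infer_instance

-- ===== CLAIM (what is proved, stated in full; the proofs are below) =====
def Claim_equal_nunmber_letter_counts : Prop := ∀ (rangemax : Int), Dom_nunmber_letter_counts rangemax → Spec_nunmber_letter_counts rangemax (nunmber_letter_counts rangemax)

-- ===== LEMMAS AND PROOFS =====

-- letters surviving A's replace-based cleanup, as an Int
def pvCleanLen (word : List Char) : Int :=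
  ((PySem.Chars.replace (PySem.Chars.replace word " ".toList "".toList) "-".toList "".toList).length : Int)

-- A's per-i contribution to the final counter
def pvGA (i : Int) : Int := (pvEntryA i).elim 0 pvCleanLen

-- filter form of the cleanup, and the cleaned length of a dictionary word
def pvCl (w : List Char) : Int :=
  (((w.filter (fun x => !(x == ' '))).filter (fun x => !(x == '-'))).length : Int)

def pvWlen (k : Int) : Int := pvCl ((pvWordsA.get? k).getD [])

lemma pv_charfold (w : List Char) (c : Int) : w.foldl (fun c _ => c + 1) c = c + (w.length : Int) := by
  induction w generalizing c with
  | nil => simp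
  | cons x xs ih => simp [List.foldl, ih]; ring

lemma pv_storage_sum (L : List Int) (st : List (List Char)) :
    ((L.foldl (fun st i => match pvEntryA i with | some w => st ++ [w] | none => st) st).map pvCleanLen).sum
      = (st.map pvCleanLen).sum + (L.map pvGA).sum := by
  induction L generalizing st with
  | nil => simp
  | cons i L ih =>
    simp only [List.foldl, List.map, List.sum_cons]
    rcases h : pvEntryA i with _ | w
    · simp [h, ih, pvGA]
    · simp [h, ih, pvGA]; ring

lemma pv_A_eq_sum (rangemax : Int) :
    nunmber_letter_counts rangemax = ((PySem.List.pyRange 1 (rangemax + 1) 1).map pvGA).sum := by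
  unfold nunmber_letter_counts
  have hstep : (fun (c : Int) (word : List Char) =>
      let w := PySem.Chars.replace (PySem.Chars.replace word " ".toList "".toList) "-".toList "".toList
      w.foldl (fun c _ => c + 1) c) = fun c word => c + pvCleanLen word := by
    funext c word; simp [pvCleanLen, pv_charfold]
  rw [hstep, PySem.List.foldl_add]
  simpa using pv_storage_sum (PySem.List.pyRange 1 (rangemax + 1) 1) []

lemma pv_B_eq_sum (rangemax : Int) :
    nunmber_letter_counts_alt rangemax
      = ((PySem.List.pyRange 1 (min rangemax 1000 + 1) 1).map pvLetters).sum := by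
  unfold nunmber_letter_counts_alt
  rw [PySem.List.foldl_add]
  simp

-- ---- evaluation lemmas for A's string machinery ----

lemma toDigitsCore_succ (b f n : Nat) (ds : List Char) :
    Nat.toDigitsCore b (f+1) n ds =
      if n / b = 0 then (n % b).digitChar :: ds else Nat.toDigitsCore b f (n / b) ((n % b).digitChar :: ds) := by
  simp [Nat.toDigitsCore]

lemma go_single (c : Char) : ∀ (fuel : Nat) (l acc : List Char), l.length ≤ fuel →
    PySem.Chars.replace.go [c] [] fuel l acc = acc.reverse ++ l.filter (fun x => !(x == c)) := by
  intro fuel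
  induction fuel with
  | zero => intro l acc h; cases l with
    | nil => simp [PySem.Chars.replace.go]
    | cons x t => simp at h
  | succ f ih =>
    intro l acc h
    cases l with
    | nil => simp [PySem.Chars.replace.go]
    | cons x t =>
      by_cases hx : x = c
      · subst hx
        have hpre : [x].isPrefixOf (x :: t) = true := by simp [List.isPrefixOf]
        simp only [PySem.Chars.replace.go, hpre, if_pos]
        rw [show List.drop [x].length (x :: t) = t from rfl, show ([] : List Char).reverse ++ acc = acc from by simp]
        rw [ih t acc (by simpa using h)]
        simp
      · have hpre : [c].isPrefixOf (x :: t) = false := by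
          simp [List.isPrefixOf]; exact fun hh => absurd hh.symm hx
        simp only [PySem.Chars.replace.go, hpre]
        rw [if_neg (by simp)]
        rw [ih t (x :: acc) (by simpa using h)]
        simp [hx]

lemma replace_single (w : List Char) (c : Char) :
    PySem.Chars.replace w [c] [] = w.filter (fun x => !(x == c)) := by
  unfold PySem.Chars.replace
  rw [if_neg (by simp)]
  simpa using go_single c w.length w [] le_rfl

lemma pvCleanLen_eq (w : List Char) : pvCleanLen w = pvCl w := by
  unfold pvCleanLen pvCl
  rw [show " ".toList = [' '] from by decide, show "-".toList = ['-'] from by decide,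
      show "".toList = ([] : List Char) from by decide, replace_single, replace_single]

lemma pvCl_append (a b : List Char) : pvCl (a ++ b) = pvCl a + pvCl b := by
  unfold pvCl
  rw [List.filter_append, List.filter_append, List.length_append]
  push_cast; ring

lemma toChars_3digit (n : Nat) (h1 : 100 ≤ n) (h2 : n < 1000) :
    PySem.Int.toChars (n : Int) = [(n / 100).digitChar, (n / 10 % 10).digitChar, (n % 10).digitChar] := by
  unfold PySem.Int.toChars
  rw [if_neg (by omega), Int.toNat_natCast]
  unfold Nat.toDigits
  rw [toDigitsCore_succ, if_neg (by omega)]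
  obtain ⟨f, hf⟩ : ∃ f, n = f + 1 := ⟨n - 1, by omega⟩
  conv_lhs => rw [show n = f + 1 from hf]
  rw [toDigitsCore_succ, if_neg (by omega)]
  obtain ⟨g, hg⟩ : ∃ g, f = g + 1 := ⟨f - 1, by omega⟩
  conv_lhs => rw [show f = g + 1 from hg]
  rw [toDigitsCore_succ, if_pos (by omega)]
  have hn : g + 1 + 1 = n := by omega
  rw [hn, show n / 10 / 10 % 10 = n / 100 by omega]

lemma ofChars_digit (d : Nat) (hd : d ≤ 9) :
    PySem.Int.ofChars? [d.digitChar] = some (d : Int) := by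
  interval_cases d <;> decide

lemma ofChars_digit0 (d : Nat) (hd : d ≤ 9) :
    PySem.Int.ofChars? [d.digitChar, '0'] = some ((10 * d : Nat) : Int) := by
  interval_cases d <;> decide

lemma ofChars_digit2 (t u : Nat) (ht : t ≤ 9) (hu : u ≤ 9) :
    PySem.Int.ofChars? [t.digitChar, u.digitChar] = some ((10 * t + u : Nat) : Int) := by
  interval_cases t <;> interval_cases u <;> decide

lemma pg0 (a b c : Char) : PySem.List.pyGet? [a, b, c] 0 = some a := by
  simp [PySem.List.pyGet?, PySem.List.pyIdx?]
lemma pg1 (a b c : Char) : PySem.List.pyGet? [a, b, c] 1 = some b := by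
  simp [PySem.List.pyGet?, PySem.List.pyIdx?]
lemma pg2 (a b c : Char) : PySem.List.pyGet? [a, b, c] 2 = some c := by
  simp [PySem.List.pyGet?, PySem.List.pyIdx?]

-- ---- letter-count tables vs cleaned dictionary-word lengths ----

lemma ones_wl (d : Nat) (hd : d ≤ 19) :
    (PySem.List.pyGet? pvOnes (d : Int)).getD 0 = pvWlen (d : Int) := by
  interval_cases d <;> decide

lemma tens_wl (t : Nat) (h2 : 2 ≤ t) (h9 : t ≤ 9) :
    (PySem.List.pyGet? pvTens (t : Int)).getD 0 = pvWlen ((10 * t : Nat) : Int) := by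
  interval_cases t <;> decide

-- ---- per-i characterisations on each region ----

set_option maxRecDepth 100000 in
set_option maxHeartbeats 4000000 in
lemma pv_chunk1 : ∀ i ∈ PySem.List.pyRange 1 101 1, pvGA i = pvLetters i := by
  have h : (PySem.List.pyRange 1 101 1).all (fun i => pvGA i == pvLetters i) = true := by decide
  intro i hi
  simpa using List.all_eq_true.mp h i hi

lemma pv_gA_zero_large (i : Int) (hi : 1000 < i) : pvGA i = 0 := by
  unfold pvGA pvEntryA
  rw [if_neg (by omega), if_neg (by omega), if_neg (by omega), if_neg (by omega),
      if_neg (by omega), if_neg (by omega)]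
  rfl

lemma gA_b5 (n : Nat) (h1 : 101 ≤ n) (h2 : n ≤ 999) (hm1 : 1 ≤ n % 100) (hm2 : n % 100 ≤ 20) :
    pvGA (n : Int) = pvWlen ((n / 100 : Nat) : Int) + 10 + pvWlen ((n % 100 : Nat) : Int) := by
  unfold pvGA pvEntryA
  rw [if_neg (by omega), if_neg (by omega), if_neg (by omega), if_neg (by omega), if_pos (by omega)]
  rw [toChars_3digit n (by omega) (by omega), pg0, pg1, pg2]
  simp only [Option.getD_some]
  rw [ofChars_digit (n / 100) (by omega), ofChars_digit2 (n / 10 % 10) (n % 10) (by omega) (by omega)]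
  simp only [Option.getD_some, Option.elim]
  rw [show (10 * (n / 10 % 10) + n % 10 : Nat) = n % 100 by omega]
  rw [pvCleanLen_eq, pvCl_append, pvCl_append,
      show pvCl " hundred and ".toList = 10 from by decide]
  unfold pvWlen
  omega

lemma gA_b6 (n : Nat) (h1 : 101 ≤ n) (h2 : n ≤ 999) (hm : 21 ≤ n % 100) :
    pvGA (n : Int) = pvWlen ((n / 100 : Nat) : Int) + 10
      + pvWlen ((10 * (n / 10 % 10) : Nat) : Int) + pvWlen ((n % 10 : Nat) : Int) := by
  have hm2 : n % 100 ≤ 99 := by omega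
  unfold pvGA pvEntryA
  rw [if_neg (by omega), if_neg (by omega), if_neg (by omega), if_neg (by omega),
      if_neg (by omega), if_pos (by omega)]
  rw [toChars_3digit n (by omega) (by omega), pg0, pg1, pg2]
  simp only [Option.getD_some]
  rw [ofChars_digit (n / 100) (by omega), ofChars_digit0 (n / 10 % 10) (by omega),
      ofChars_digit (n % 10) (by omega)]
  simp only [Option.getD_some, Option.elim]
  rw [pvCleanLen_eq, pvCl_append, pvCl_append, pvCl_append, pvCl_append,
      show pvCl " hundred and ".toList = 10 from by decide,
      show pvCl "-".toList = 0 from by decide]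
  unfold pvWlen
  omega

lemma gA_round (n : Nat) (h1 : 100 ≤ n) (h2 : n ≤ 900) (hr : n % 100 = 0) :
    pvGA (n : Int) = pvWlen ((n / 100 : Nat) : Int) + 7 := by
  unfold pvGA pvEntryA
  rw [if_neg (by omega), if_neg (by omega), if_pos (by omega)]
  have hfd : PySem.Int.floordiv (n : Int) 100 = ((n / 100 : Nat) : Int) := by
    exact_mod_cast PySem.Int.floordiv_natCast n 100
  rw [hfd]
  simp only [Option.elim]
  rw [pvCleanLen_eq, pvCl_append, show pvCl " hundred".toList = 7 from by decide]
  unfold pvWlen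
  omega

lemma gA_1000 : pvGA (1000 : Int) = 11 := by decide

lemma letters_1000 : pvLetters (1000 : Int) = 11 := by decide

lemma letters_cast_aux (n : Nat) (h1 : 101 ≤ n) (h2 : n ≤ 999) :
    pvLetters (n : Int) =
      (PySem.List.pyGet? pvOnes ((n / 100 : Nat) : Int)).getD 0 + 7 +
        (if ((n % 100 : Nat) : Int) ≠ 0 then
          3 + (if ((n % 100 : Nat) : Int) < 20 then (PySem.List.pyGet? pvOnes ((n % 100 : Nat) : Int)).getD 0
            else (PySem.List.pyGet? pvTens ((n % 100 / 10 : Nat) : Int)).getD 0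
              + (PySem.List.pyGet? pvOnes ((n % 100 % 10 : Nat) : Int)).getD 0)
          else 0) := by
  simp only [pvLetters]
  have hfd : PySem.Int.floordiv (n : Int) 100 = ((n / 100 : Nat) : Int) := by
    exact_mod_cast PySem.Int.floordiv_natCast n 100
  have hmd : PySem.Int.mod (n : Int) 100 = ((n % 100 : Nat) : Int) := by
    exact_mod_cast PySem.Int.mod_natCast n 100
  have hfd2 : PySem.Int.floordiv ((n % 100 : Nat) : Int) 10 = ((n % 100 / 10 : Nat) : Int) := by
    exact_mod_cast PySem.Int.floordiv_natCast (n % 100) 10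
  have hmd2 : PySem.Int.mod ((n % 100 : Nat) : Int) 10 = ((n % 100 % 10 : Nat) : Int) := by
    exact_mod_cast PySem.Int.mod_natCast (n % 100) 10
  rw [if_neg (by omega), hfd, hmd, hfd2, hmd2, if_neg (by omega)]

lemma letters_b5 (n : Nat) (h1 : 101 ≤ n) (h2 : n ≤ 999) (hm1 : 1 ≤ n % 100) (hm2 : n % 100 ≤ 20) :
    pvLetters (n : Int) = pvWlen ((n / 100 : Nat) : Int) + 10 + pvWlen ((n % 100 : Nat) : Int) := by
  rw [letters_cast_aux n h1 h2, if_pos (by omega), ones_wl (n / 100) (by omega)]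
  by_cases h20 : n % 100 = 20
  · rw [if_neg (by omega), h20]
    rw [show (20 / 10 : Nat) = 2 from by norm_num, show (20 % 10 : Nat) = 0 from by norm_num]
    rw [show (PySem.List.pyGet? pvTens ((2 : Nat) : Int)).getD 0 = 6 from by decide,
        show (PySem.List.pyGet? pvOnes ((0 : Nat) : Int)).getD 0 = 0 from by decide,
        show pvWlen ((20 : Nat) : Int) = 6 from by decide]
    omega
  · rw [if_pos (by omega), ones_wl (n % 100) (by omega)]
    omega

lemma letters_b6 (n : Nat) (h1 : 101 ≤ n) (h2 : n ≤ 999) (hm : 21 ≤ n % 100) :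
    pvLetters (n : Int) = pvWlen ((n / 100 : Nat) : Int) + 10
      + pvWlen ((10 * (n / 10 % 10) : Nat) : Int) + pvWlen ((n % 10 : Nat) : Int) := by
  rw [letters_cast_aux n h1 h2, if_pos (by omega), if_neg (by omega),
      ones_wl (n / 100) (by omega),
      show (n % 100 / 10 : Nat) = n / 10 % 10 by omega,
      show (n % 100 % 10 : Nat) = n % 10 by omega,
      tens_wl (n / 10 % 10) (by omega) (by omega), ones_wl (n % 10) (by omega)]
  omega

lemma letters_round (n : Nat) (h1 : 100 ≤ n) (h2 : n ≤ 900) (hr : n % 100 = 0) :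
    pvLetters (n : Int) = pvWlen ((n / 100 : Nat) : Int) + 7 := by
  by_cases h100 : n = 100
  · subst h100; decide
  · rw [letters_cast_aux n (by omega) (by omega), if_neg (by omega),
        ones_wl (n / 100) (by omega)]
    omega

lemma pv_point (n : Nat) (h1 : 1 ≤ n) (h2 : n ≤ 1000) : pvGA (n : Int) = pvLetters (n : Int) := by
  by_cases hc1 : n ≤ 100
  · exact pv_chunk1 (n : Int) (by rw [PySem.List.mem_pyRange_one]; omega)
  · by_cases hc2 : n = 1000
    · subst hc2; rw [show ((1000 : Nat) : Int) = (1000 : Int) from by norm_num, gA_1000, letters_1000]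
    · by_cases hc3 : n % 100 = 0
      · rw [gA_round n (by omega) (by omega) hc3, letters_round n (by omega) (by omega) hc3]
      · by_cases hc4 : n % 100 ≤ 20
        · rw [gA_b5 n (by omega) (by omega) (by omega) hc4,
              letters_b5 n (by omega) (by omega) (by omega) hc4]
        · rw [gA_b6 n (by omega) (by omega) (by omega),
              letters_b6 n (by omega) (by omega) (by omega)]

lemma pv_sums_eq (n : Nat) :
    ((PySem.List.pyRange 1 ((n : Int) + 1) 1).map pvGA).sum
      = ((PySem.List.pyRange 1 (min (n : Int) 1000 + 1) 1).map pvLetters).sum := by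
  induction n with
  | zero => simp [PySem.List.pyRange_one_eq_nil]
  | succ n ih =>
    have h1 : (1 : Int) ≤ (n : Int) + 1 := by omega
    have hcast : ((n + 1 : Nat) : Int) = (n : Int) + 1 := by push_cast; ring
    rw [hcast, PySem.List.pyRange_one_succ_right h1, List.map_append, List.sum_append]
    by_cases hc : n + 1 ≤ 1000
    · have hmins : min ((n : Int) + 1) 1000 = (n : Int) + 1 := by omega
      have hminn : min ((n : Int)) 1000 = (n : Int) := by omega
      rw [hmins, PySem.List.pyRange_one_succ_right h1, List.map_append, List.sum_append, ih, hminn]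
      have hpoint : pvGA ((n : Int) + 1) = pvLetters ((n : Int) + 1) := by
        rw [show ((n : Int) + 1) = ((n + 1 : Nat) : Int) from by push_cast; ring]
        exact pv_point (n + 1) (by omega) (by omega)
      simp only [List.map_cons, List.map_nil, List.sum_cons, List.sum_nil]
      omega
    · have hmins : min ((n : Int) + 1) 1000 = min (n : Int) 1000 := by omega
      rw [hmins, ih]
      have hz : pvGA ((n : Int) + 1) = 0 := pv_gA_zero_large _ (by omega)
      simp only [List.map_cons, List.map_nil, List.sum_cons, List.sum_nil]
      omega

-- ===== VERDICT (by name: the statement is the Claim_ definition above) =====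
theorem nunmber_letter_counts_spec : Claim_equal_nunmber_letter_counts := by
  intro rangemax _
  unfold Spec_nunmber_letter_counts
  rw [pv_A_eq_sum, pv_B_eq_sum]
  rcases (by omega : rangemax ≤ 0 ∨ 0 < rangemax) with hle | hpos
  · have hmin : min rangemax 1000 = rangemax := by omega
    rw [hmin, PySem.List.pyRange_one_eq_nil (by omega)]
    simp
  · rw [show rangemax = ((rangemax.toNat : Nat) : Int) from by omega]
    exact pv_sums_eq rangemax.toNat
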